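-- pv_equiv track=rewrite | github.com/Clases23/pensamiento-algoritmico | ejemplos/solucion_taller_repaso2.py | ventas_trimestrales_resumen
-- ===== SOURCE A (Python) =====
-- def ventas_trimestrales_resumen(matriz):
--     """
--     matriz: lista de filas (departamentos), cada fila con c trimestres (enteros).
--     Retorna (totales_fila, totales_col, idx_mayor_fila).
--     """
--     if len(matriz) == 0 or len(matriz[0]) == 0:
--         return [], [], -1
--
--     filas = len(matriz)
--     columnas = len(matriz[0])
--
--     # Totales por fila
--     totales_fila = []
--     f = 0
--     while f < filas:
--         suma = 0
--         c = 0
--         while c < columnas: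
--             suma = suma + matriz[f][c]
--             c = c + 1
--         totales_fila.append(suma)
--         f = f + 1
--
--     # Totales por columna
--     totales_col = []
--     c = 0
--     while c < columnas:
--         suma_col = 0
--         f = 0
--         while f < filas:
--             suma_col = suma_col + matriz[f][c]
--             f = f + 1
--         totales_col.append(suma_col)
--         c = c + 1
--
--     # Índice de la fila con mayor total
--     idx_mayor = 0
--     i = 1
--     while i < len(totales_fila):
--         if totales_fila[i] > totales_fila[idx_mayor]:
--             idx_mayor = i
--         i = i + 1
--
--     return totales_fila, totales_col, idx_mayor
-- ===== SOURCE B (Python) =====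
-- def ventas_trimestrales_resumen(matriz):
--     if len(matriz) == 0 or len(matriz[0]) == 0:
--         return [], [], -1
--     columnas = len(matriz[0])
--     totales_fila = []
--     totales_col = [0] * columnas
--     idx_mayor = 0
--     for f, fila in enumerate(matriz):
--         s = sum(fila[:columnas])
--         totales_fila.append(s)
--         totales_col = [a + b for a, b in zip(totales_col, fila)]
--         if s > totales_fila[idx_mayor]:
--             idx_mayor = f
--     return totales_fila, totales_col, idx_mayor
-- ===== Notes on version B (the rewrite author's own statement) =====
-- stated objective: faster
-- what changed: Single pass over the rows with zip/comprehension-accumulated column totals, slice-sum row totals and an online running argmax, replacing A's three separate index-driven while-loop passes.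
-- outside the precondition, e.g. on ventas_trimestrales_resumen([[1, 2], [3]]): A raises IndexError, B returns ([3, 3], [4], 0)
import Mathlib
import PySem

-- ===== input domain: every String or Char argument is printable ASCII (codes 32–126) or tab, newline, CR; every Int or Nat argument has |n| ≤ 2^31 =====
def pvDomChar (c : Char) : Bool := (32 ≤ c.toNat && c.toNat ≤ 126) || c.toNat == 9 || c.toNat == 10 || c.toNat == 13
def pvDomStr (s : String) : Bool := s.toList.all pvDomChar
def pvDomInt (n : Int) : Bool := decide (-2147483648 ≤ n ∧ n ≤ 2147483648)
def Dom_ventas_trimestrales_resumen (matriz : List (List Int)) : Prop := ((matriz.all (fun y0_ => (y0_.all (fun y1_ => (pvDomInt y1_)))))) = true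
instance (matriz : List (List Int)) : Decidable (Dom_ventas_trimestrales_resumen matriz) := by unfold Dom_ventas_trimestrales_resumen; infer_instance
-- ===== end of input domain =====

-- B replaces A's three separate index-driven passes by a single pass over the rows
-- (zip-accumulated column totals, slice-sum row totals, online argmax); equivalence
-- is about the return value only (neither version mutates its argument).

-- ===== PORT A =====
def ventas_trimestrales_resumen (matriz : List (List Int)) : List Int × List Int × Int :=
  if matriz.length = 0 ∨ (matriz.headD []).length = 0 then ([], [], -1) else
  let filas := matriz.length
  let columnas := (matriz.headD []).length
  let totales_fila := (List.range filas).foldl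
    (fun acc f => acc ++ [(List.range columnas).foldl (fun s c => s + ((matriz.getD f []).getD c 0)) 0]) []
  let totales_col := (List.range columnas).foldl
    (fun acc c => acc ++ [(List.range filas).foldl (fun s f => s + ((matriz.getD f []).getD c 0)) 0]) []
  let idx_mayor := (List.range' 1 (totales_fila.length - 1)).foldl
    (fun idx i => if totales_fila.getD i 0 > totales_fila.getD idx 0 then i else idx) 0
  (totales_fila, totales_col, (idx_mayor : Int))

-- ===== PORT B =====
-- loop body of B's single pass: state = (f, totales_fila, totales_col, idx_mayor)
def bStep (k : Nat) (st : Nat × List Int × List Int × Nat) (fila : List Int) :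
    Nat × List Int × List Int × Nat :=
  let s := (fila.take k).sum
  let tf := st.2.1 ++ [s]
  let tc := List.zipWith (· + ·) st.2.2.1 fila
  let idx := if s > tf.getD st.2.2.2 0 then st.1 else st.2.2.2
  (st.1 + 1, tf, tc, idx)

def ventas_trimestrales_resumen_alt (matriz : List (List Int)) : List Int × List Int × Int :=
  if matriz.length = 0 ∨ (matriz.headD []).length = 0 then ([], [], -1) else
  let columnas := (matriz.headD []).length
  let st := matriz.foldl (bStep columnas) (0, [], List.replicate columnas 0, 0)
  (st.2.1, st.2.2.1, (st.2.2.2 : Int))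

-- ===== PRECONDITION & SPEC =====
-- Pre_ excludes ragged matrices with a row shorter than the first row, on which A raises IndexError.
def Pre_ventas_trimestrales_resumen (matriz : List (List Int)) : Prop :=
  ∀ r ∈ matriz, (matriz.headD []).length ≤ r.length
instance (matriz : List (List Int)) : Decidable (Pre_ventas_trimestrales_resumen matriz) := by unfold Pre_ventas_trimestrales_resumen; infer_instance
def pvWitness_ventas_trimestrales_resumen : List (List Int) := [[1, 2], [3, 4, 5]]

def Spec_ventas_trimestrales_resumen (matriz : List (List Int)) (out : List Int × List Int × Int) : Prop := out = ventas_trimestrales_resumen_alt matriz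
instance (matriz : List (List Int)) (out : List Int × List Int × Int) : Decidable (Spec_ventas_trimestrales_resumen matriz out) := by unfold Spec_ventas_trimestrales_resumen; infer_instance

-- ===== CLAIM (what is proved, stated in full; the proofs are below) =====
def Claim_equal_ventas_trimestrales_resumen : Prop := ∀ (matriz : List (List Int)), Dom_ventas_trimestrales_resumen matriz → Pre_ventas_trimestrales_resumen matriz → Spec_ventas_trimestrales_resumen matriz (ventas_trimestrales_resumen matriz)

-- ===== LEMMAS AND PROOFS =====

-- canonical forms both ports are reduced to
def tfS (k : Nat) (m : List (List Int)) : List Int := m.map (fun r => (r.take k).sum)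
def colS (k : Nat) (m : List (List Int)) : List Int :=
  (List.range k).map (fun c => m.foldl (fun s r => s + r.getD c 0) 0)
def idxS (l : List Int) : Nat :=
  (List.range' 1 (l.length - 1)).foldl (fun idx i => if l.getD i 0 > l.getD idx 0 then i else idx) 0

-- a while-loop over indices is a fold over the list
theorem foldl_range_getD {α β : Type} (l : List α) (d : α) (h : β → α → β) (init : β) :
    (List.range l.length).foldl (fun s i => h s (l.getD i d)) init = l.foldl h init := by
  induction l generalizing init with
  | nil => simp
  | cons a t ih =>
      simp only [List.length_cons, List.range_succ_eq_map, List.foldl_cons, List.foldl_map,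
        List.getD_cons_zero, List.getD_cons_succ]
      exact ih _

theorem map_range_getD {α β : Type} (l : List α) (d : α) (g : α → β) :
    (List.range l.length).map (fun i => g (l.getD i d)) = l.map g := by
  induction l with
  | nil => simp
  | cons a t ih =>
      simp only [List.length_cons, List.range_succ_eq_map, List.map_cons, List.map_map,
        List.getD_cons_zero]
      refine congrArg _ ?_
      simpa [Function.comp, List.getD_cons_succ] using ih

theorem rowsum_eq (r : List Int) (k : Nat) (hk : k ≤ r.length) :
    (List.range k).foldl (fun s c => s + r.getD c 0) 0 = (r.take k).sum := by
  rw [PySem.List.foldl_add]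
  have : (List.range k).map (fun c => r.getD c 0) = r.take k := by
    apply List.ext_getElem
    · simp [Nat.min_eq_left hk]
    · intro i h1 h2
      have : i < r.length := lt_of_lt_of_le (by simpa using h1) hk
      simp [List.getD_eq_getElem?_getD, this]
  rw [this]; ring

theorem zipWith_map_range (k : Nat) (g : Nat → Int) (r : List Int) (hk : k ≤ r.length) :
    List.zipWith (· + ·) ((List.range k).map g) r
      = (List.range k).map (fun c => g c + r.getD c 0) := by
  apply List.ext_getElem
  · simp [Nat.min_eq_left hk]
  · intro i h1 h2
    have hi : i < k := by simpa using h2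
    have hir : i < r.length := lt_of_lt_of_le hi hk
    simp [List.getD_eq_getElem?_getD, hir]

theorem colS_snoc (k : Nat) (m : List (List Int)) (r : List Int) (hk : k ≤ r.length) :
    colS k (m ++ [r]) = List.zipWith (· + ·) (colS k m) r := by
  rw [colS, colS, zipWith_map_range k _ r hk]
  simp

-- the argmax fold preserves 'index < length' and ignores a snoc on the positions it reads
theorem idxFold_pres (l : List Int) (x : Int) (xs : List Nat) :
    ∀ a : Nat, a < l.length → (∀ i ∈ xs, i < l.length) →
      (xs.foldl (fun idx i => if (l ++ [x]).getD i 0 > (l ++ [x]).getD idx 0 then i else idx) a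
        = xs.foldl (fun idx i => if l.getD i 0 > l.getD idx 0 then i else idx) a)
      ∧ xs.foldl (fun idx i => if l.getD i 0 > l.getD idx 0 then i else idx) a < l.length := by
  induction xs with
  | nil => intro a ha _; exact ⟨rfl, ha⟩
  | cons j t ih =>
      intro a ha hmem
      have hj : j < l.length := hmem j (by simp)
      have hstep : (if (l ++ [x]).getD j 0 > (l ++ [x]).getD a 0 then j else a)
          = (if l.getD j 0 > l.getD a 0 then j else a) := by
        rw [List.getD_append l [x] 0 j hj, List.getD_append l [x] 0 a ha]
      have hlt : (if l.getD j 0 > l.getD a 0 then j else a) < l.length := by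
        split <;> [exact hj; exact ha]
      have H := ih _ hlt (fun i hi => hmem i (by simp [hi]))
      simp only [List.foldl_cons]
      rw [hstep]
      exact H

theorem idxS_lt (l : List Int) (hl : l ≠ []) : idxS l < l.length := by
  have h0 : 0 < l.length := List.length_pos_iff.mpr hl
  exact (idxFold_pres l 0 (List.range' 1 (l.length - 1)) 0 h0
    (fun i hi => by have := List.mem_range'.mp hi; omega)).2

theorem idxS_snoc (l : List Int) (x : Int) (hl : l ≠ []) :
    idxS (l ++ [x]) = if x > l.getD (idxS l) 0 then l.length else idxS l := by
  have h0 : 0 < l.length := List.length_pos_iff.mpr hl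
  have hr : List.range' 1 ((l ++ [x]).length - 1)
      = List.range' 1 (l.length - 1) ++ [l.length] := by
    have h1 : (l ++ [x]).length - 1 = (l.length - 1) + 1 := by
      simp
      omega
    rw [h1, List.range'_concat]
    congr 1
    simp
    omega
  have hpres := idxFold_pres l x (List.range' 1 (l.length - 1)) 0 h0
    (fun i hi => by
      obtain ⟨j, hj, rfl⟩ := List.mem_range'.mp hi
      omega)
  have hx : (l ++ [x]).getD l.length 0 = x := by
    simp [List.getD_eq_getElem?_getD]
  unfold idxS
  rw [hr, List.foldl_append, List.foldl_cons, List.foldl_nil, hpres.1,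
    List.getD_append l [x] 0 _ hpres.2, hx]

-- B's single-pass fold computes the canonical triple
theorem B_inv (k : Nat) (rest : List (List Int)) :
    ∀ p : List (List Int), p ≠ [] → (∀ r ∈ rest, k ≤ r.length) →
    rest.foldl (bStep k) (p.length, tfS k p, colS k p, idxS (tfS k p))
      = ((p ++ rest).length, tfS k (p ++ rest), colS k (p ++ rest), idxS (tfS k (p ++ rest))) := by
  induction rest with
  | nil => intro p _ _; simp
  | cons r t ih =>
      intro p hp hlen
      have hkr : k ≤ r.length := hlen r (by simp)
      have htfne : tfS k p ≠ [] := by simp [tfS]; exact hp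
      have hIl : idxS (tfS k p) < (tfS k p).length := idxS_lt _ htfne
      have hlenp : (tfS k p).length = p.length := by simp [tfS]
      have hgetD : (tfS k p ++ [(r.take k).sum]).getD (idxS (tfS k p)) 0
          = (tfS k p).getD (idxS (tfS k p)) 0 :=
        List.getD_append _ _ _ _ hIl
      have htf : tfS k p ++ [(r.take k).sum] = tfS k (p ++ [r]) := by simp [tfS]
      have hcol : List.zipWith (· + ·) (colS k p) r = colS k (p ++ [r]) :=
        (colS_snoc k p r hkr).symm
      have hidx : (if (r.take k).sum > (tfS k p).getD (idxS (tfS k p)) 0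
            then p.length else idxS (tfS k p)) = idxS (tfS k (p ++ [r])) := by
        rw [← htf, idxS_snoc (tfS k p) ((r.take k).sum) htfne, hlenp]
      have hpl : p.length + 1 = (p ++ [r]).length := by simp
      have hstep : bStep k (p.length, tfS k p, colS k p, idxS (tfS k p)) r
          = ((p ++ [r]).length, tfS k (p ++ [r]), colS k (p ++ [r]), idxS (tfS k (p ++ [r]))) := by
        unfold bStep
        show (p.length + 1, tfS k p ++ [(r.take k).sum], List.zipWith (· + ·) (colS k p) r,
            if (r.take k).sum > (tfS k p ++ [(r.take k).sum]).getD (idxS (tfS k p)) 0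
              then p.length else idxS (tfS k p)) = _
        rw [hgetD, hidx, htf, hcol, hpl]
      rw [List.foldl_cons, hstep]
      simpa using ih (p ++ [r]) (by simp) (fun r' hr' => hlen r' (by simp [hr']))

-- B's first loop iteration from the empty state
theorem bStep_init (r0 : List Int) :
    bStep r0.length (0, [], List.replicate r0.length 0, 0) r0
      = ([r0].length, tfS r0.length [r0], colS r0.length [r0], idxS (tfS r0.length [r0])) := by
  unfold bStep
  show ((0 : Nat) + 1, ([] : List Int) ++ [(r0.take r0.length).sum],
      List.zipWith (· + ·) (List.replicate r0.length 0) r0,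
      if (r0.take r0.length).sum > (([] : List Int) ++ [(r0.take r0.length).sum]).getD 0 0
        then (0 : Nat) else (0 : Nat)) = _
  have hc1 : List.zipWith (· + ·) (List.replicate r0.length (0 : Int)) r0
      = colS r0.length [r0] := by
    have hrep : List.replicate r0.length (0 : Int)
        = (List.range r0.length).map (fun _ => (0 : Int)) := by simp
    rw [hrep, zipWith_map_range r0.length (fun _ => 0) r0 le_rfl]
    rfl
  rw [ite_self, hc1]
  rfl

-- ===== VERDICT (by name: the statement is the Claim_ definition above) =====
theorem ventas_trimestrales_resumen_spec : Claim_equal_ventas_trimestrales_resumen := by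
  intro m _ hpre
  unfold Spec_ventas_trimestrales_resumen ventas_trimestrales_resumen ventas_trimestrales_resumen_alt
  rcases m with _ | ⟨r0, tl⟩
  · rfl
  · by_cases hk0 : r0.length = 0
    · have hg : ((r0 :: tl).length = 0 ∨ ((r0 :: tl).headD []).length = 0) := by simp [hk0]
      rw [if_pos hg, if_pos hg]
    · have hg : ¬((r0 :: tl).length = 0 ∨ ((r0 :: tl).headD []).length = 0) := by simp [hk0]
      rw [if_neg hg, if_neg hg]
      simp only [List.headD_cons]
      have hpre' : ∀ r ∈ r0 :: tl, r0.length ≤ r.length := by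
        simpa [Pre_ventas_trimestrales_resumen] using hpre
      have hA_tf : (List.range (r0 :: tl).length).foldl
          (fun acc f => acc ++
            [(List.range r0.length).foldl (fun s c => s + (((r0 :: tl).getD f []).getD c 0)) 0]) []
          = tfS r0.length (r0 :: tl) := by
        rw [PySem.List.foldl_append_singleton_eq_map, List.nil_append,
          map_range_getD (r0 :: tl) []
            (fun r => (List.range r0.length).foldl (fun s c => s + r.getD c 0) 0)]
        exact List.map_congr_left (fun r hr => rowsum_eq r r0.length (hpre' r hr))
      have hA_tc : (List.range r0.length).foldl
          (fun acc c => acc ++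
            [(List.range (r0 :: tl).length).foldl (fun s f => s + (((r0 :: tl).getD f []).getD c 0)) 0]) []
          = colS r0.length (r0 :: tl) := by
        rw [PySem.List.foldl_append_singleton_eq_map, List.nil_append]
        exact List.map_congr_left
          (fun c _ => foldl_range_getD (r0 :: tl) [] (fun s r => s + r.getD c 0) 0)
      have hB : (r0 :: tl).foldl (bStep r0.length) (0, [], List.replicate r0.length 0, 0)
          = ((r0 :: tl).length, tfS r0.length (r0 :: tl), colS r0.length (r0 :: tl),
              idxS (tfS r0.length (r0 :: tl))) := by
        rw [List.foldl_cons, bStep_init]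
        have := B_inv r0.length tl [r0] (by simp) (fun r hr => hpre' r (by simp [hr]))
        simpa using this
      simp only [hA_tf, hA_tc, hB, idxS]
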